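-- pv_equiv track=rewrite | github.com/snowholt/chefbelle | final/tests/latest.py | identify_dietary_tags
-- ===== SOURCE A (Python) =====
-- def identify_dietary_tags(ingredients):
--     """
--     Identify dietary preferences based on ingredients
--     """
--     # Handle empty ingredients list
--     if not ingredients or not isinstance(ingredients, (list, str)):
--         return []
--
--     # Convert list of ingredients to a single string for easier checking
--     ingredients_str = ' '.join(ingredients).lower()
--
--     tags = []
--
--     # Vegetarian check (simplified)
--     meat_ingredients = ['chicken', 'beef', 'pork', 'lamb', 'turkey', 'veal', 'bacon']
--     if not any(meat in ingredients_str for meat in meat_ingredients):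
--         tags.append('vegetarian')
--
--         # Vegan check (simplified)
--         animal_products = ['cheese', 'milk', 'cream', 'yogurt', 'butter', 'egg', 'honey']
--         if not any(product in ingredients_str for product in animal_products):
--             tags.append('vegan')
--
--     # Gluten-free check (simplified)
--     gluten_ingredients = ['flour', 'wheat', 'barley', 'rye', 'pasta', 'bread']
--     if not any(gluten in ingredients_str for gluten in gluten_ingredients):
--         tags.append('gluten-free')
--
--     # Low-carb check (simplified)
--     high_carb_ingredients = ['sugar', 'pasta', 'rice', 'potato', 'bread', 'flour']
--     if not any(carb in ingredients_str for carb in high_carb_ingredients):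
--         tags.append('low-carb')
--
--     # Dairy-free check
--     dairy_ingredients = ['milk', 'cheese', 'cream', 'yogurt', 'butter']
--     if not any(dairy in ingredients_str for dairy in dairy_ingredients):
--         tags.append('dairy-free')
--
--     return tags
-- ===== SOURCE B (Python) =====
-- def identify_dietary_tags(ingredients):
--     """
--     Identify dietary preferences based on ingredients.
--     Single left-to-right scan of the joined text: at each position test which
--     keyword starts there and collect the set of restriction categories found,
--     then emit the tags whose category is absent.
--     """
--     if not ingredients or not isinstance(ingredients, (list, str)):
--         return []
--
--     s = ' '.join(ingredients).lower()
--
--     cat_of = {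
--         'chicken': ('meat',), 'beef': ('meat',), 'pork': ('meat',), 'lamb': ('meat',),
--         'turkey': ('meat',), 'veal': ('meat',), 'bacon': ('meat',),
--         'milk': ('animal', 'dairy'), 'cheese': ('animal', 'dairy'),
--         'cream': ('animal', 'dairy'), 'yogurt': ('animal', 'dairy'),
--         'butter': ('animal', 'dairy'), 'egg': ('animal',), 'honey': ('animal',),
--         'flour': ('gluten', 'carb'), 'pasta': ('gluten', 'carb'),
--         'bread': ('gluten', 'carb'), 'wheat': ('gluten',), 'barley': ('gluten',),
--         'rye': ('gluten',), 'sugar': ('carb',), 'rice': ('carb',), 'potato': ('carb',),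
--     }
--
--     found = set()
--     for i in range(len(s)):
--         for kw, cats in cat_of.items():
--             if s.startswith(kw, i):
--                 found.update(cats)
--
--     tags = []
--     if 'meat' not in found:
--         tags.append('vegetarian')
--         if 'animal' not in found:
--             tags.append('vegan')
--     for cat, tag in (('gluten', 'gluten-free'), ('carb', 'low-carb'), ('dairy', 'dairy-free')):
--         if cat not in found:
--             tags.append(tag)
--     return tags
-- ===== Notes on version B (the rewrite author's own statement) =====
-- stated objective: alternative
-- what changed: Instead of five separate any(keyword in s) substring searches, B makes one left-to-right scan over the joined lowercased text, at each position testing which keyword starts there via a keyword->categories map and accumulating a set of present restriction categories, then emits the tags whose category is absent.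
import Mathlib
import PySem

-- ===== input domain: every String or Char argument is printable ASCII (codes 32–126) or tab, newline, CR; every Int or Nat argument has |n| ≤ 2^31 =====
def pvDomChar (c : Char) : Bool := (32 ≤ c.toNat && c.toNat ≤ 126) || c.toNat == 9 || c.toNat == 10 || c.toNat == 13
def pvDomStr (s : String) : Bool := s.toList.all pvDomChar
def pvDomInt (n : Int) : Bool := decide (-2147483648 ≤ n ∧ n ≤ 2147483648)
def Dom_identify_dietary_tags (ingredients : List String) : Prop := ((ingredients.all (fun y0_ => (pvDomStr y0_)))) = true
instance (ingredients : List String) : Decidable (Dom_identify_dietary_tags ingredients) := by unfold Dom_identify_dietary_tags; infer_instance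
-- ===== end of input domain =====

-- B replaces A's five per-keyword substring searches by one left-to-right scan of the
-- joined text that collects the set of present restriction categories (objective:
-- alternative algorithm of similar cost); return values proved equal.

-- ===== PORT A =====
def identify_dietary_tags (ingredients : List String) : List String :=
  -- `not ingredients or not isinstance(...)`: for a list argument this is just emptiness
  if ingredients = [] then []
  else
    let ingredients_str := PySem.Str.lower (PySem.Str.join " " ingredients)
    let tags : List String := []
    let meat_ingredients := ["chicken", "beef", "pork", "lamb", "turkey", "veal", "bacon"]
    let tags :=
      if !(meat_ingredients.any (fun meat => PySem.Str.isIn meat ingredients_str)) then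
        let tags := tags ++ ["vegetarian"]
        let animal_products := ["cheese", "milk", "cream", "yogurt", "butter", "egg", "honey"]
        if !(animal_products.any (fun product => PySem.Str.isIn product ingredients_str)) then
          tags ++ ["vegan"]
        else tags
      else tags
    let gluten_ingredients := ["flour", "wheat", "barley", "rye", "pasta", "bread"]
    let tags :=
      if !(gluten_ingredients.any (fun gluten => PySem.Str.isIn gluten ingredients_str)) then
        tags ++ ["gluten-free"]
      else tags
    let high_carb_ingredients := ["sugar", "pasta", "rice", "potato", "bread", "flour"]
    let tags :=
      if !(high_carb_ingredients.any (fun carb => PySem.Str.isIn carb ingredients_str)) then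
        tags ++ ["low-carb"]
      else tags
    let dairy_ingredients := ["milk", "cheese", "cream", "yogurt", "butter"]
    let tags :=
      if !(dairy_ingredients.any (fun dairy => PySem.Str.isIn dairy ingredients_str)) then
        tags ++ ["dairy-free"]
      else tags
    tags

-- ===== PORT B =====
-- Source B's cat_of dict: keyword → the restriction categories it witnesses
def pvCatOf : List (String × List String) :=
  [("chicken", ["meat"]), ("beef", ["meat"]), ("pork", ["meat"]), ("lamb", ["meat"]),
   ("turkey", ["meat"]), ("veal", ["meat"]), ("bacon", ["meat"]),
   ("milk", ["animal", "dairy"]), ("cheese", ["animal", "dairy"]),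
   ("cream", ["animal", "dairy"]), ("yogurt", ["animal", "dairy"]),
   ("butter", ["animal", "dairy"]), ("egg", ["animal"]), ("honey", ["animal"]),
   ("flour", ["gluten", "carb"]), ("pasta", ["gluten", "carb"]),
   ("bread", ["gluten", "carb"]), ("wheat", ["gluten"]), ("barley", ["gluten"]),
   ("rye", ["gluten"]), ("sugar", ["carb"]), ("rice", ["carb"]), ("potato", ["carb"])]

-- the scanning loop of Source B: one pass over the positions of cs, collecting categories
def pvFound (cs : List Char) : PySem.Set String :=
  (List.range cs.length).foldl (fun acc i =>
    pvCatOf.foldl (fun acc2 kv =>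
      if PySem.Chars.startswith (cs.drop i) kv.1.toList then PySem.Set.update acc2 kv.2
      else acc2) acc) PySem.Set.empty

def identify_dietary_tags_alt (ingredients : List String) : List String :=
  if ingredients = [] then []
  else
    let cs := (PySem.Str.lower (PySem.Str.join " " ingredients)).toList
    -- Python's s.startswith(kw, i) with 0 ≤ i is exactly Chars.startswith on (cs.drop i)
    let found := pvFound cs
    let tags : List String := []
    let tags :=
      if !(PySem.Set.contains found "meat") then
        let tags := tags ++ ["vegetarian"]
        if !(PySem.Set.contains found "animal") then tags ++ ["vegan"] else tags
      else tags
    [("gluten", "gluten-free"), ("carb", "low-carb"), ("dairy", "dairy-free")].foldl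
      (fun tags ct => if !(PySem.Set.contains found ct.1) then tags ++ [ct.2] else tags) tags

-- ===== PRECONDITION & SPEC =====
def Spec_identify_dietary_tags (ingredients : List String) (out : List String) : Prop := out = identify_dietary_tags_alt ingredients
instance (ingredients : List String) (out : List String) : Decidable (Spec_identify_dietary_tags ingredients out) := by unfold Spec_identify_dietary_tags; infer_instance

-- ===== CLAIM =====
def Claim_equal_identify_dietary_tags : Prop := ∀ (ingredients : List String), Dom_identify_dietary_tags ingredients → Spec_identify_dietary_tags ingredients (identify_dietary_tags ingredients)

-- ===== LEMMAS AND PROOFS =====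

theorem pv_mem_update {s : PySem.Set String} {l : List String} {x : String} :
    x ∈ PySem.Set.update s l ↔ x ∈ s ∨ x ∈ l := by
  induction l generalizing s with
  | nil => simp [PySem.Set.update]
  | cons h t ih =>
      simp only [PySem.Set.update, List.foldl_cons] at *
      rw [ih, PySem.Set.mem_add]
      simp [or_assoc, or_comm, or_left_comm]

-- membership after a fold whose step either leaves acc or adds elements,
-- characterised by Q
theorem pv_mem_foldl {β : Type} (step : PySem.Set String → β → PySem.Set String)
    (Q : β → Prop) (x : String)
    (h : ∀ acc t, x ∈ step acc t ↔ x ∈ acc ∨ Q t) :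
    ∀ (l : List β) (acc : PySem.Set String),
      x ∈ l.foldl step acc ↔ x ∈ acc ∨ ∃ t ∈ l, Q t := by
  intro l
  induction l with
  | nil => simp
  | cons hd tl ih =>
      intro acc
      simp only [List.foldl_cons, ih, h, List.mem_cons]
      constructor
      · rintro ((hx | hq) | ⟨t, ht, hq⟩)
        · exact Or.inl hx
        · exact Or.inr ⟨hd, Or.inl rfl, hq⟩
        · exact Or.inr ⟨t, Or.inr ht, hq⟩
      · rintro (hx | ⟨t, (rfl | ht), hq⟩)
        · exact Or.inl (Or.inl hx)
        · exact Or.inl (Or.inr hq)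
        · exact Or.inr ⟨t, ht, hq⟩

theorem pv_kw_ne : ∀ kv ∈ pvCatOf, kv.1.toList ≠ [] := by decide

theorem pv_mem_inner (cs : List Char) (i : Nat) (acc : PySem.Set String) (x : String) :
    x ∈ pvCatOf.foldl (fun acc2 kv =>
        if PySem.Chars.startswith (cs.drop i) kv.1.toList then PySem.Set.update acc2 kv.2
        else acc2) acc
      ↔ x ∈ acc ∨ ∃ kv ∈ pvCatOf, kv.1.toList <+: cs.drop i ∧ x ∈ kv.2 := by
  refine pv_mem_foldl _ (fun (kv : String × List String) => kv.1.toList <+: cs.drop i ∧ x ∈ kv.2) x ?_ _ _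
  intro acc2 kv
  by_cases hst : PySem.Chars.startswith (cs.drop i) kv.1.toList = true
  · rw [if_pos hst, pv_mem_update]
    have hp := (PySem.Chars.startswith_iff _ _).mp hst
    simp [hp]
  · rw [if_neg hst]
    have hp : ¬ kv.1.toList <+: cs.drop i := fun h => hst ((PySem.Chars.startswith_iff _ _).mpr h)
    simp [hp]

theorem pv_bounded_drop (cs kw : List Char) (hkw : kw ≠ []) :
    (∃ i ∈ List.range cs.length, kw <+: cs.drop i) ↔ PySem.Chars.isIn kw cs = true := by
  rw [← PySem.Chars.exists_prefix_drop_iff_isIn]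
  constructor
  · rintro ⟨i, _, hp⟩; exact ⟨i, hp⟩
  · rintro ⟨j, hp⟩
    by_cases hj : j < cs.length
    · exact ⟨j, List.mem_range.mpr hj, hp⟩
    · rw [List.drop_eq_nil_of_le (Nat.le_of_not_lt hj)] at hp
      exact absurd (List.prefix_nil.mp hp) hkw

theorem pv_found_spec (cs : List Char) (x : String) :
    x ∈ pvFound cs
      ↔ ∃ kv ∈ pvCatOf, PySem.Chars.isIn kv.1.toList cs = true ∧ x ∈ kv.2 := by
  unfold pvFound
  rw [pv_mem_foldl _ (fun i => ∃ kv ∈ pvCatOf, kv.1.toList <+: cs.drop i ∧ x ∈ kv.2) x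
        (fun acc i => pv_mem_inner cs i acc x)]
  simp only [PySem.Set.empty, List.not_mem_nil, false_or]
  constructor
  · rintro ⟨i, hi, kv, hkv, hp, hx⟩
    exact ⟨kv, hkv, (pv_bounded_drop cs kv.1.toList (pv_kw_ne kv hkv)).mp ⟨i, hi, hp⟩, hx⟩
  · rintro ⟨kv, hkv, hin, hx⟩
    obtain ⟨i, hi, hp⟩ := (pv_bounded_drop cs kv.1.toList (pv_kw_ne kv hkv)).mpr hin
    exact ⟨i, hi, kv, hkv, hp, hx⟩

-- category membership in `found` = A's any-keyword test
theorem pv_contains_eq (cs : List Char) (c : String) (kws : List String)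
    (h : (∃ kv ∈ pvCatOf, PySem.Chars.isIn kv.1.toList cs = true ∧ c ∈ kv.2)
          ↔ kws.any (fun kw => PySem.Chars.isIn kw.toList cs) = true) :
    PySem.Set.contains (pvFound cs) c
      = kws.any (fun kw => PySem.Chars.isIn kw.toList cs) := by
  rw [Bool.eq_iff_iff]
  simp only [PySem.Set.contains, List.contains_iff_mem]
  rw [pv_found_spec cs c, h]

theorem pv_meat (cs : List Char) :
    PySem.Set.contains (pvFound cs) "meat"
      = (["chicken", "beef", "pork", "lamb", "turkey", "veal", "bacon"] : List String).any
          (fun kw => PySem.Chars.isIn kw.toList cs) :=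
  pv_contains_eq cs _ _ (by simp [pvCatOf]; try tauto)

theorem pv_animal (cs : List Char) :
    PySem.Set.contains (pvFound cs) "animal"
      = (["cheese", "milk", "cream", "yogurt", "butter", "egg", "honey"] : List String).any
          (fun kw => PySem.Chars.isIn kw.toList cs) :=
  pv_contains_eq cs _ _ (by simp [pvCatOf]; try tauto)

theorem pv_gluten (cs : List Char) :
    PySem.Set.contains (pvFound cs) "gluten"
      = (["flour", "wheat", "barley", "rye", "pasta", "bread"] : List String).any
          (fun kw => PySem.Chars.isIn kw.toList cs) :=
  pv_contains_eq cs _ _ (by simp [pvCatOf]; try tauto)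

theorem pv_carb (cs : List Char) :
    PySem.Set.contains (pvFound cs) "carb"
      = (["sugar", "pasta", "rice", "potato", "bread", "flour"] : List String).any
          (fun kw => PySem.Chars.isIn kw.toList cs) :=
  pv_contains_eq cs _ _ (by simp [pvCatOf]; try tauto)

theorem pv_dairy (cs : List Char) :
    PySem.Set.contains (pvFound cs) "dairy"
      = (["milk", "cheese", "cream", "yogurt", "butter"] : List String).any
          (fun kw => PySem.Chars.isIn kw.toList cs) :=
  pv_contains_eq cs _ _ (by simp [pvCatOf]; try tauto)

-- ===== VERDICT =====
theorem identify_dietary_tags_spec : Claim_equal_identify_dietary_tags := by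
  intro ingredients _
  unfold Spec_identify_dietary_tags identify_dietary_tags identify_dietary_tags_alt
  by_cases hnil : ingredients = []
  · simp [hnil]
  · simp only [if_neg hnil]
    set st := PySem.Str.lower (PySem.Str.join " " ingredients) with hst
    simp only [List.foldl_cons, List.foldl_nil, PySem.Str.isIn_eq, pv_meat, pv_animal, pv_gluten, pv_carb, pv_dairy]

    rfl
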